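-- pv_equiv track=rewrite | github.com/dev-olly/Algorithms-and-Data-Structures | toptal2.py | countKAverageSubarrays
-- ===== SOURCE A (Python) =====
-- def countKAverageSubarrays(arr, n, k):
--     # To Store the final answer
--     res = 0
--
--     # Calculate all subarrays
--     for L in range(n):
--         sum = 0
--         for R in range(L,n,1):
--             # Calculate required average
--             sum += arr[R]
--             len1 = (R - L + 1)
--
--             # Check if average
--             # is equal to k
--             if (sum % len1 == 0):
--                 avg = sum // len1
--
--                 # Required average found
--                 if (avg == k):
--
--                     # Increment res
--                     res += 1
--
--     return res
-- ===== SOURCE B (Python) =====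
-- def countKAverageSubarrays(arr, n, k):
--     # Prefix sums of (arr[i] - k): a subarray has average k exactly when
--     # its (arr[i]-k)-sum is 0, i.e. two prefix sums are equal.
--     counts = {0: 1}
--     s = 0
--     res = 0
--     for i in range(n):
--         s += arr[i] - k
--         res += counts.get(s, 0)
--         counts[s] = counts.get(s, 0) + 1
--     return res
-- ===== Notes on version B (the rewrite author's own statement) =====
-- stated objective: faster
-- what changed: Replaced the nested O(n^2) scan over all subarrays (with an explicit %-and-// average test per subarray) by a single pass over prefix sums of (arr[i]-k) with a hashmap counting equal prefix values (zero-sum subarrays).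
import Mathlib
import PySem

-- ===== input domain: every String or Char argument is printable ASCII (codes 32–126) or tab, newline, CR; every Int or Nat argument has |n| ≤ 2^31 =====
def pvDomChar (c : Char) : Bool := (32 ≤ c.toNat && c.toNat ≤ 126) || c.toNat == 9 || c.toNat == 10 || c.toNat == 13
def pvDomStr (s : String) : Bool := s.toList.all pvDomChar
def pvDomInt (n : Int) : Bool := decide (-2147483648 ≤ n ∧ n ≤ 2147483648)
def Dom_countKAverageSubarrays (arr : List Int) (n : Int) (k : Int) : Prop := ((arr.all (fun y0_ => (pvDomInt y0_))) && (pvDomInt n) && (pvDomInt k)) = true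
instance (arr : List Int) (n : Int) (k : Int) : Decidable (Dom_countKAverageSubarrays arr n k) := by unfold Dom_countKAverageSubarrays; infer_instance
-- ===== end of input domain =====

-- B replaces A's O(n^2) double loop over subarrays by a single pass over prefix
-- sums of (arr[i]-k) with a dict counting equal prefix values (objective: faster).

-- ===== PORT A =====
-- inner-loop step of A: sum += arr[R]; len1 = R-L+1; if sum % len1 == 0 and sum//len1 == k: res += 1
def aStep (arr : List Int) (k L : Int) (st : Int × Int) (R : Int) : Int × Int :=
  let sum := st.1 + PySem.List.pyGetD arr R 0
  let len1 := R - L + 1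
  let res := if PySem.Int.mod sum len1 = 0 then
      (if PySem.Int.floordiv sum len1 = k then st.2 + 1 else st.2) else st.2
  (sum, res)

def countKAverageSubarrays (arr : List Int) (n : Int) (k : Int) : Int :=
  (PySem.List.pyRange 0 n 1).foldl
    (fun res L => ((PySem.List.pyRange L n 1).foldl (aStep arr k L) (0, res)).2) 0

-- ===== PORT B =====
-- loop step of B: s += arr[i]-k; res += counts.get(s,0); counts[s] = counts.get(s,0)+1
def bStep (arr : List Int) (k : Int) (st : PySem.Dict Int Int × Int × Int) (i : Int) :
    PySem.Dict Int Int × Int × Int :=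
  let s := st.2.1 + (PySem.List.pyGetD arr i 0 - k)
  let res := st.2.2 + st.1.getD s 0
  (st.1.insert s (st.1.getD s 0 + 1), s, res)

def countKAverageSubarrays_alt (arr : List Int) (n : Int) (k : Int) : Int :=
  ((PySem.List.pyRange 0 n 1).foldl (bStep arr k)
    (PySem.Dict.empty.insert 0 1, 0, 0)).2.2

-- ===== PRECONDITION & SPEC =====
-- Pre_ excludes exactly the inputs where Python A raises IndexError: n > len(arr)
def Pre_countKAverageSubarrays (arr : List Int) (n : Int) (k : Int) : Prop :=
  n ≤ (arr.length : Int)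
instance (arr : List Int) (n : Int) (k : Int) : Decidable (Pre_countKAverageSubarrays arr n k) := by
  unfold Pre_countKAverageSubarrays; infer_instance

def pvWitness_countKAverageSubarrays : List Int × Int × Int := ([1, 1, 2], 3, 1)

def Spec_countKAverageSubarrays (arr : List Int) (n : Int) (k : Int) (out : Int) : Prop := out = countKAverageSubarrays_alt arr n k
instance (arr : List Int) (n : Int) (k : Int) (out : Int) : Decidable (Spec_countKAverageSubarrays arr n k out) := by unfold Spec_countKAverageSubarrays; infer_instance

-- ===== CLAIM (what is proved, stated in full; the proofs are below) =====
def Claim_equal_countKAverageSubarrays : Prop := ∀ (arr : List Int) (n : Int) (k : Int), Dom_countKAverageSubarrays arr n k → Pre_countKAverageSubarrays arr n k → Spec_countKAverageSubarrays arr n k (countKAverageSubarrays arr n k)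

-- ===== LEMMAS AND PROOFS =====

-- prefix sum of (arr[j]-k) over j < i
def pref (arr : List Int) (k : Int) (i : Int) : Int := (arr.take i.toNat).sum - k * i

-- the prefix values P a, P (a+1), ..., P n
def qTail (arr : List Int) (k n a : Int) : List Int :=
  (PySem.List.pyRange a (n + 1) 1).map (pref arr k)

-- each element counts the equal elements AFTER it
def sLater : List Int → Int
  | [] => 0
  | x :: xs => (xs.count x : Int) + sLater xs

-- each element counts the equal elements in 'seen' accumulated so far
def eCount : List Int → List Int → Int
  | _, [] => 0
  | seen, x :: xs => (seen.count x : Int) + eCount (seen ++ [x]) xs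

lemma pref_zero (arr : List Int) (k : Int) : pref arr k 0 = 0 := by
  simp [pref]

lemma pref_succ (arr : List Int) (k i : Int) (h0 : 0 ≤ i) (hl : i < (arr.length : Int)) :
    pref arr k (i + 1) = pref arr k i + (PySem.List.pyGetD arr i 0 - k) := by
  have hi : i.toNat < arr.length := by omega
  have ht : (i + 1).toNat = i.toNat + 1 := by omega
  rw [pref, pref, ht, List.sum_take_succ _ _ hi,
    PySem.List.pyGetD_eq_getElem arr 0 h0 hl]
  ring

-- A's %-and-// test equals the exact product test
lemma aCond (sum len r k : Int) (h : 0 < len) :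
    (if PySem.Int.mod sum len = 0 then
      (if PySem.Int.floordiv sum len = k then r + 1 else r) else r)
    = (if sum = k * len then r + 1 else r) := by
  rw [PySem.Int.mod_eq_emod_of_pos h, PySem.Int.floordiv_eq_ediv_of_pos h]
  have hne : len ≠ 0 := by omega
  by_cases hs : sum = k * len
  · subst hs
    simp [Int.mul_emod_left, Int.mul_ediv_cancel _ hne]
  · by_cases hm : sum % len = 0
    · have hd : len ∣ sum := Int.dvd_of_emod_eq_zero hm
      obtain ⟨c, hc⟩ := hd
      subst hc
      have : len * c / len = c := by
        rw [Int.mul_comm]; exact Int.mul_ediv_cancel _ hne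
      simp only [hm, this]
      have : c ≠ k := fun hck => hs (by rw [hck]; ring)
      simp [this, hs]
    · simp [hm, hs]

lemma qTail_cons (arr : List Int) (k n a : Int) (h : a ≤ n) :
    qTail arr k n a = pref arr k a :: qTail arr k n (a + 1) := by
  rw [qTail, PySem.List.pyRange_one_cons (by omega), List.map_cons, qTail]

lemma qTail_nil (arr : List Int) (k n : Int) :
    qTail arr k n (n + 1) = [] := by
  rw [qTail, PySem.List.pyRange_one_eq_nil (by omega), List.map_nil]

-- ---------- A-side characterisation ----------

lemma ainner (arr : List Int) (n k L : Int) (hn : n ≤ (arr.length : Int)) (hL : 0 ≤ L) :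
    ∀ (c : Nat) (a res : Int), L ≤ a → a ≤ n → (n - a).toNat = c →
    (PySem.List.pyRange a n 1).foldl (aStep arr k L)
        ((arr.take a.toNat).sum - (arr.take L.toNat).sum, res)
      = ((arr.take n.toNat).sum - (arr.take L.toNat).sum,
         res + ((qTail arr k n (a + 1)).count (pref arr k L) : Int)) := by
  intro c
  induction c with
  | zero =>
    intro a res hLa han hc
    have ha : a = n := by omega
    subst ha
    rw [PySem.List.pyRange_one_eq_nil (by omega), qTail_nil]
    simp
  | succ c ih =>
    intro a res hLa han hc
    have hlt : a < n := by omega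
    rw [PySem.List.pyRange_one_cons hlt, List.foldl_cons]
    have hstep : aStep arr k L ((arr.take a.toNat).sum - (arr.take L.toNat).sum, res) a
        = ((arr.take (a + 1).toNat).sum - (arr.take L.toNat).sum,
           if pref arr k (a + 1) = pref arr k L then res + 1 else res) := by
      have hs : (arr.take a.toNat).sum - (arr.take L.toNat).sum + PySem.List.pyGetD arr a 0
          = (arr.take (a + 1).toNat).sum - (arr.take L.toNat).sum := by
        have ht : (a + 1).toNat = a.toNat + 1 := by omega
        have hi : a.toNat < arr.length := by omega
        rw [ht, List.sum_take_succ _ _ hi,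
          PySem.List.pyGetD_eq_getElem arr 0 (by omega) (by omega)]
        ring
      simp only [aStep]
      rw [hs]
      rw [aCond _ _ _ _ (by omega)]
      congr 1
      have hiff : ((arr.take (a + 1).toNat).sum - (arr.take L.toNat).sum = k * (a - L + 1))
          ↔ (pref arr k (a + 1) = pref arr k L) := by
        rw [pref, pref]
        constructor <;> intro h <;> nlinarith [h]
      by_cases hp : pref arr k (a + 1) = pref arr k L
      · rw [if_pos (hiff.mpr hp), if_pos hp]
      · rw [if_neg (fun hh => hp (hiff.mp hh)), if_neg hp]
    rw [hstep]
    rw [ih (a + 1) _ (by omega) (by omega) (by omega)]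
    rw [qTail_cons arr k n (a + 1) (by omega)]
    simp only [Prod.mk.injEq, List.count_cons]
    refine ⟨trivial, ?_⟩
    by_cases hp : pref arr k (a + 1) = pref arr k L
    · simp only [hp, beq_self_eq_true]
      push_cast
      ring
    · have hb : (pref arr k (a + 1) == pref arr k L) = false := by
        simpa using hp
      simp only [hp, hb, if_false]
      push_cast
      ring

lemma aouter (arr : List Int) (n k : Int) (hn : n ≤ (arr.length : Int)) :
    ∀ (c : Nat) (a res : Int), 0 ≤ a → a ≤ n → (n - a).toNat = c →
    (PySem.List.pyRange a n 1).foldl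
        (fun res L => ((PySem.List.pyRange L n 1).foldl (aStep arr k L) (0, res)).2) res
      = res + sLater (qTail arr k n a) := by
  intro c
  induction c with
  | zero =>
    intro a res h0 han hc
    have ha : a = n := by omega
    rw [PySem.List.pyRange_one_eq_nil (by omega), ha,
      qTail_cons arr k n n (le_refl n), qTail_nil]
    simp [sLater]
  | succ c ih =>
    intro a res h0 han hc
    have hlt : a < n := by omega
    rw [PySem.List.pyRange_one_cons hlt, List.foldl_cons]
    have h00 : ((0 : Int), res) = ((arr.take a.toNat).sum - (arr.take a.toNat).sum, res) := by
      norm_num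
    rw [h00,
      ainner arr n k a hn h0 (n - a).toNat a res (le_refl a) (by omega) rfl]
    rw [ih (a + 1) _ (by omega) (by omega) (by omega)]
    rw [qTail_cons arr k n a (by omega), sLater]
    ring

-- ---------- B-side characterisation ----------

lemma counter_snoc (seen : List Int) (x : Int) :
    PySem.Dict.counter (seen ++ [x])
      = (PySem.Dict.counter seen).insert x ((PySem.Dict.counter seen).getD x 0 + 1) := by
  rw [← PySem.Dict.foldl_insert_getD_add_one_eq_counter,
      ← PySem.Dict.foldl_insert_getD_add_one_eq_counter, List.foldl_append]
  simp

lemma bloop (arr : List Int) (n k : Int) (hn : n ≤ (arr.length : Int)) :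
    ∀ (c : Nat) (a : Int) (seen : List Int) (res : Int), 0 ≤ a → a ≤ n → (n - a).toNat = c →
    ((PySem.List.pyRange a n 1).foldl (bStep arr k)
        (PySem.Dict.counter seen, pref arr k a, res)).2.2
      = res + eCount seen (qTail arr k n (a + 1)) := by
  intro c
  induction c with
  | zero =>
    intro a seen res h0 han hc
    have ha : a = n := by omega
    subst ha
    rw [PySem.List.pyRange_one_eq_nil (by omega), qTail_nil]
    simp [eCount]
  | succ c ih =>
    intro a seen res h0 han hc
    have hlt : a < n := by omega
    rw [PySem.List.pyRange_one_cons hlt, List.foldl_cons]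
    have hstep : bStep arr k (PySem.Dict.counter seen, pref arr k a, res) a
        = (PySem.Dict.counter (seen ++ [pref arr k (a + 1)]), pref arr k (a + 1),
           res + (seen.count (pref arr k (a + 1)) : Int)) := by
      simp only [bStep]
      have hs : pref arr k a + (PySem.List.pyGetD arr a 0 - k) = pref arr k (a + 1) :=
        (pref_succ arr k a (by omega) (by omega)).symm
      simp only [hs, counter_snoc, PySem.Dict.getD_counter]
    rw [hstep, ih (a + 1) _ _ (by omega) (by omega) (by omega)]
    rw [qTail_cons arr k n (a + 1) (by omega), eCount]
    ring

-- ---------- the two counts agree ----------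

lemma count_singleton_sum (xs : List Int) (x : Int) :
    (xs.map (fun y => (([x].count y : Nat) : Int))).sum = (xs.count x : Int) := by
  have hf : (fun y : Int => (([x].count y : Nat) : Int))
      = (fun y : Int => if (y == x) = true then 1 else 0) := by
    funext y
    by_cases h : y = x
    · subst h; simp
    · have h2 : (x == y) = false := by simpa using (Ne.symm h)
      have h3 : (y == x) = false := by simpa using h
      simp [List.count_cons, h2, h3]
  rw [hf, PySem.List.sum_map_ite_one_zero]
  rfl

lemma eCount_eq (xs : List Int) : ∀ seen : List Int,
    eCount seen xs = sLater xs + (xs.map (fun y => (seen.count y : Int))).sum := by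
  induction xs with
  | nil => intro seen; simp [eCount, sLater]
  | cons x xs ih =>
    intro seen
    rw [eCount, ih (seen ++ [x]), sLater, List.map_cons, List.sum_cons]
    have hc : ∀ y : Int, ((seen ++ [x]).count y : Int)
        = (seen.count y : Int) + (([x].count y : Nat) : Int) := by
      intro y; rw [List.count_append]; push_cast; ring
    have : (xs.map (fun y => ((seen ++ [x]).count y : Int))).sum
        = (xs.map (fun y => (seen.count y : Int))).sum + (xs.count x : Int) := by
      calc (xs.map (fun y => ((seen ++ [x]).count y : Int))).sum
          = (xs.map (fun y => (seen.count y : Int) + (([x].count y : Nat) : Int))).sum := by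
            congr 1; exact List.map_congr_left (fun y _ => hc y)
        _ = (xs.map (fun y => (seen.count y : Int))).sum
            + (xs.map (fun y => (([x].count y : Nat) : Int))).sum := by
            rw [← List.sum_map_add]
        _ = (xs.map (fun y => (seen.count y : Int))).sum + (xs.count x : Int) := by
            rw [count_singleton_sum]
    rw [this]
    ring

lemma counter_zero : PySem.Dict.counter ([0] : List Int)
    = (PySem.Dict.empty : PySem.Dict Int Int).insert 0 1 := by
  decide

-- ===== VERDICT (by name: the statement is the Claim_ definition above) =====
theorem countKAverageSubarrays_spec : Claim_equal_countKAverageSubarrays := by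
  intro arr n k _hdom hpre
  unfold Spec_countKAverageSubarrays
  unfold countKAverageSubarrays countKAverageSubarrays_alt
  by_cases hn : n < 0
  · rw [PySem.List.pyRange_one_eq_nil (by omega)]
    simp
  · push_neg at hn
    have hpre' : n ≤ (arr.length : Int) := hpre
    rw [aouter arr n k hpre' (n - 0).toNat 0 0 (le_refl 0) hn rfl]
    rw [← counter_zero]
    have hb := bloop arr n k hpre' (n - 0).toNat 0 [0] 0 (le_refl 0) hn rfl
    rw [pref_zero] at hb
    rw [hb, eCount_eq, qTail_cons arr k n 0 hn, pref_zero, sLater,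
      count_singleton_sum]
    ring
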